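-- pv_equiv track=rewrite | github.com/lschanne/python-miscellaneous | permute-string.py | IncludeSubsets
-- ===== SOURCE A (Python) =====
-- def IncludeSubsets(inputString, inputList = [], currentString = ''):
--     """
--     This method will list all permutations of the characters in the given string as well as the permutations of all subsets of the characters (that include at least one character) in the given string.
--     """
--     listOfPermutations = inputList[:]
--     if inputString:
--         for i in range(len(inputString)):
--             currentCharacter = inputString[i]
--             remainingCharacters = inputString[:i] + inputString[i + 1:]
--             newString = currentString + currentCharacter
--             listOfPermutations = IncludeSubsets(remainingCharacters, listOfPermutations, newString)
--             listOfPermutations = IncludeSubsets(remainingCharacters, listOfPermutations, currentString)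
--     elif currentString:
--         listOfPermutations.append(currentString)
--     return listOfPermutations
-- ===== SOURCE B (Python) =====
-- def IncludeSubsets(inputString, inputList = [], currentString = ''):
--     """Iterative explicit-stack DFS instead of double recursion; appends into one
--     result list (no per-call list copying)."""
--     result = inputList[:]
--     stack = [(inputString, currentString)]
--     while stack:
--         remaining, current = stack.pop()
--         if remaining:
--             # push children in reverse so popping expands i = 0..len-1,
--             # include-child before exclude-child (A's pre-order)
--             for i in range(len(remaining) - 1, -1, -1):
--                 rest = remaining[:i] + remaining[i + 1:]
--                 stack.append((rest, current))
--                 stack.append((rest, current + remaining[i]))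
--         elif current:
--             result.append(current)
--     return result
-- ===== Notes on version B (the rewrite author's own statement) =====
-- stated objective: alternative
-- what changed: Replaces the double recursion (which copies the accumulator list on every recursive call) with an explicit-stack iterative DFS that appends into a single result list, pushing children in reverse so the pre-order output is identical.
import Mathlib
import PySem

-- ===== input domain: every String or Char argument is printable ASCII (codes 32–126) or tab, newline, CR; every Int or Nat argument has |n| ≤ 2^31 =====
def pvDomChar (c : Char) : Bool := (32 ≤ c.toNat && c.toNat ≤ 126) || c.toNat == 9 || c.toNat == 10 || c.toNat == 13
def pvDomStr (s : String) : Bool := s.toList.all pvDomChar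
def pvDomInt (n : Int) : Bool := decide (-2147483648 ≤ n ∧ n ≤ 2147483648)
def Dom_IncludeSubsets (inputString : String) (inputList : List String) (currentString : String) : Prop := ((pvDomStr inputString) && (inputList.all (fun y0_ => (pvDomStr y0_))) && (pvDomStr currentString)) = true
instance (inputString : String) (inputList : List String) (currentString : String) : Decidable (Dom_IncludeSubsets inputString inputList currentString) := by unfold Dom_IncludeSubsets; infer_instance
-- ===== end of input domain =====

-- B replaces A's double recursion (which copies the accumulator list at every call) by an
-- explicit-stack DFS appending into one result list; same output order.
-- Strings are handled as List Char (PySem.Chars convention); built strings are materialised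
-- with String.ofList, which is exact for Python string concatenation.

-- ===== PORT A =====
-- literal port of A's double recursion; the `for i in range(len(inputString))` loop is loopA.
mutual
def goA (s : List Char) (acc : List String) (cur : List Char) : List String :=
  match s with
  | [] => if cur ≠ [] then acc ++ [String.ofList cur] else acc   -- elif currentString: append
  | a :: t => loopA (a :: t) cur 0 acc
termination_by (s.length, 1, 0)
decreasing_by exact Prod.Lex.right _ (Prod.Lex.left _ _ (by omega))
def loopA (s : List Char) (cur : List Char) (i : Nat) (acc : List String) : List String :=
  if h : i < s.length then
    let currentCharacter := s[i]
    let remainingCharacters := s.take i ++ s.drop (i + 1)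
    let newString := cur ++ [currentCharacter]
    loopA s cur (i + 1) (goA remainingCharacters (goA remainingCharacters acc newString) cur)
  else acc
termination_by (s.length, 0, s.length - i)
decreasing_by
· exact Prod.Lex.left _ _ (by simp [List.length_take, List.length_drop]; omega)
· exact Prod.Lex.left _ _ (by simp [List.length_take, List.length_drop]; omega)
· exact Prod.Lex.right _ (Prod.Lex.right _ (by omega))
end

-- listOfPermutations = inputList[:] (copying is the identity on immutable Lean lists)
def IncludeSubsets (inputString : String) (inputList : List String) (currentString : String) : List String :=
  goA inputString.toList inputList currentString.toList

-- ===== PORT B =====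
-- Source B pops from the END of its stack and pushes children in REVERSE (exclude before include,
-- i from len-1 down to 0); here the stack's HEAD is the top, so the children appear forward
-- (i ascending, include before exclude): the sequence of popped frames is identical.
def childrenB (s cur : List Char) : List (List Char × List Char) :=
  (List.range s.length).flatMap (fun i =>
    [(s.take i ++ s.drop (i + 1), cur ++ [s[i]!]), (s.take i ++ s.drop (i + 1), cur)])

-- termination measure: frames of remaining-length n cost (n+1)!·2ⁿ
def pvCost (n : Nat) : Nat := (n + 1).factorial * 2 ^ n

lemma pvSumFlatMap {α : Type} (l : List α) (f : α → List Nat) :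
    (l.flatMap f).sum = (l.map fun x => (f x).sum).sum := by
  induction l with
  | nil => rfl
  | cons a t ih => simp [List.flatMap_cons, ih]

lemma pvCost_children (s cur : List Char) (h : s ≠ []) :
    ((childrenB s cur).map (fun p => pvCost p.1.length)).sum < pvCost s.length := by
  obtain ⟨m, hm⟩ : ∃ m, s.length = m + 1 :=
    ⟨s.length - 1, by cases s with | nil => exact absurd rfl h | cons a t => simp⟩
  have hmap : ((childrenB s cur).map (fun p => pvCost p.1.length)).sum
      = ((List.range s.length).map (fun i => pvCost ((s.take i ++ s.drop (i + 1)).length) * 2)).sum := by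
    unfold childrenB
    rw [List.map_flatMap, pvSumFlatMap]
    apply congrArg
    apply List.map_congr_left
    intro i _
    simp
    omega
  rw [hmap]
  have heq : ∀ i ∈ List.range s.length,
      pvCost ((s.take i ++ s.drop (i + 1)).length) * 2 = pvCost m * 2 := by
    intro i hi
    rw [List.mem_range] at hi
    congr 2
    simp [List.length_take, List.length_drop]
    omega
  rw [List.map_congr_left heq, List.map_const', List.sum_replicate_nat, List.length_range, hm]
  unfold pvCost
  have h1 : (m + 1 + 1).factorial = (m + 2) * (m + 1).factorial := rfl
  have h2 : (2 : Nat) ^ (m + 1) = 2 ^ m * 2 := rfl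
  calc (m + 1) * ((m + 1).factorial * 2 ^ m * 2)
      < (m + 2) * ((m + 1).factorial * 2 ^ m * 2) := by
        apply Nat.mul_lt_mul_of_lt_of_le (by omega) (le_refl _) (by positivity)
    _ = (m + 2) * (m + 1).factorial * (2 ^ m * 2) := by ring
    _ = (m + 1 + 1).factorial * 2 ^ (m + 1) := by rw [h1, h2]

def runB (stack : List (List Char × List Char)) (acc : List String) : List String :=
  match stack with
  | [] => acc
  | (s, cur) :: rest =>
    match s with
    | [] => runB rest (if cur ≠ [] then acc ++ [String.ofList cur] else acc)
    | a :: t => runB (childrenB (a :: t) cur ++ rest) acc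
termination_by (stack.map (fun p => pvCost p.1.length)).sum
decreasing_by
· simp [pvCost]
· simp only [List.map_append, List.sum_append, List.map_cons, List.sum_cons]
  have := pvCost_children (s := a :: t) (cur := cur) (by simp)
  omega

def IncludeSubsets_alt (inputString : String) (inputList : List String) (currentString : String) : List String :=
  runB [(inputString.toList, currentString.toList)] inputList

-- ===== PRECONDITION & SPEC =====
def Spec_IncludeSubsets (inputString : String) (inputList : List String) (currentString : String) (out : List String) : Prop := out = IncludeSubsets_alt inputString inputList currentString
instance (inputString : String) (inputList : List String) (currentString : String) (out : List String) : Decidable (Spec_IncludeSubsets inputString inputList currentString out) := by unfold Spec_IncludeSubsets; infer_instance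

-- ===== CLAIM (what is proved, stated in full; the proofs are below) =====
def Claim_equal_IncludeSubsets : Prop := ∀ (inputString : String) (inputList : List String) (currentString : String), Dom_IncludeSubsets inputString inputList currentString → Spec_IncludeSubsets inputString inputList currentString (IncludeSubsets inputString inputList currentString)

-- ===== LEMMAS AND PROOFS =====

-- the common mathematical value: the pre-order list of generated strings (no accumulator)
def permsBody (s cur : List Char) (recur : (r : List Char) → r.length < s.length → List Char → List String) : Nat → List String :=
  fun i =>
    if h : i < s.length then
      recur (s.take i ++ s.drop (i + 1)) (by simp [List.length_take, List.length_drop]; omega) (cur ++ [s[i]!])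
        ++ recur (s.take i ++ s.drop (i + 1)) (by simp [List.length_take, List.length_drop]; omega) cur
    else []

def perms (s cur : List Char) : List String :=
  match s with
  | [] => if cur ≠ [] then [String.ofList cur] else []
  | a :: t =>
    (List.range (a :: t).length).attach.flatMap
      (fun ⟨i, _⟩ => permsBody (a :: t) cur (fun r _ c => perms r c) i)
termination_by s.length
decreasing_by all_goals assumption

-- unattached body, used on indices known to be in range
def body (s cur : List Char) (i : Nat) : List String :=
  perms (s.take i ++ s.drop (i + 1)) (cur ++ [s[i]!]) ++ perms (s.take i ++ s.drop (i + 1)) cur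

lemma attach_flatMap {α β : Type} (l : List α) (g : α → List β) :
    l.attach.flatMap (fun x => g x.1) = l.flatMap g := by
  conv_rhs => rw [← List.attach_map_subtype_val l]
  rw [List.flatMap_map]

lemma perms_cons (a : Char) (t : List Char) (cur : List Char) :
    perms (a :: t) cur = (List.range (a :: t).length).flatMap (body (a :: t) cur) := by
  rw [perms]
  rw [attach_flatMap (List.range (a :: t).length)
      (fun i => permsBody (a :: t) cur (fun r _ c => perms r c) i)]
  apply List.flatMap_congr
  intro i hi
  rw [List.mem_range] at hi
  simp only [permsBody, body, dif_pos hi]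

-- A's loop computes the tail of the flatMap, starting at index i
lemma loopA_eq (n : Nat) :
    ∀ s : List Char, s.length ≤ n → ∀ (cur : List Char) (i : Nat) (acc : List String),
      (∀ r : List Char, r.length < s.length → ∀ acc' cur', goA r acc' cur' = acc' ++ perms r cur') →
      loopA s cur i acc = acc ++ ((List.range s.length).drop i).flatMap (body s cur) := by
  intro s hs cur
  have : ∀ k i acc, s.length - i ≤ k →
      (∀ r : List Char, r.length < s.length → ∀ acc' cur', goA r acc' cur' = acc' ++ perms r cur') →
      loopA s cur i acc = acc ++ ((List.range s.length).drop i).flatMap (body s cur) := by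
    intro k
    induction k with
    | zero =>
      intro i acc hk _
      rw [loopA]
      have h1 : ¬ i < s.length := by omega
      have hd : List.drop i (List.range s.length) = [] :=
        List.drop_eq_nil_of_le (by simp; omega)
      simp [h1, hd]
    | succ k ih =>
      intro i acc hk hgo
      rw [loopA]
      by_cases h : i < s.length
      · simp only [h, dif_pos]
        have hrem : (s.take i ++ s.drop (i + 1)).length < s.length := by
          simp [List.length_take, List.length_drop]; omega
        rw [hgo _ hrem, hgo _ hrem, ih (i + 1) _ (by omega) hgo]
        have hdrop : (List.range s.length).drop i = i :: (List.range s.length).drop (i + 1) := by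
          rw [List.drop_eq_getElem_cons (by simpa using h)]
          simp
        rw [hdrop, List.flatMap_cons]
        have : s[i] = s[i]! := by
          rw [List.getElem!_eq_getElem?_getD, List.getElem?_eq_getElem h]
          rfl
        simp [body, this, List.append_assoc]
      · have hd : List.drop i (List.range s.length) = [] :=
          List.drop_eq_nil_of_le (by simp; omega)
        simp [h, hd]
  exact fun i acc => this (s.length - i) i acc (le_refl _)

lemma goA_eq (n : Nat) : ∀ s : List Char, s.length ≤ n →
    ∀ (acc : List String) (cur : List Char), goA s acc cur = acc ++ perms s cur := by
  induction n with
  | zero =>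
    intro s hs acc cur
    have : s = [] := List.eq_nil_of_length_eq_zero (by omega)
    subst this
    rw [goA, perms]
    split <;> simp_all
  | succ n ih =>
    intro s hs acc cur
    match s with
    | [] =>
      rw [goA, perms]
      split <;> simp_all
    | a :: t =>
      rw [goA, perms_cons]
      have := loopA_eq (n + 1) (a :: t) hs cur 0 acc
        (fun r hr acc' cur' => ih r (by simp only [List.length_cons] at hs hr; omega) acc' cur')
      simpa using this

lemma childrenB_mem_len (s cur : List Char) (p : List Char × List Char)
    (hp : p ∈ childrenB s cur) : p.1.length + 1 = s.length := by
  unfold childrenB at hp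
  rw [List.mem_flatMap] at hp
  obtain ⟨i, hi, hpi⟩ := hp
  rw [List.mem_range] at hi
  have hlen : (s.take i ++ s.drop (i + 1)).length + 1 = s.length := by
    simp [List.length_take, List.length_drop]; omega
  simp only [List.mem_cons] at hpi
  rcases hpi with h | h | h
  · rw [h]; exact hlen
  · rw [h]; exact hlen
  · cases h

lemma runB_eq (n : Nat) : ∀ s : List Char, s.length ≤ n →
    ∀ (cur : List Char) (rest : List (List Char × List Char)) (acc : List String),
      runB ((s, cur) :: rest) acc = runB rest (acc ++ perms s cur) := by
  induction n with
  | zero =>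
    intro s hs cur rest acc
    have : s = [] := List.eq_nil_of_length_eq_zero (by omega)
    subst this
    rw [runB, perms]
    split <;> simp_all
  | succ n ih =>
    intro s hs cur rest acc
    match s with
    | [] =>
      rw [runB, perms]
      split <;> simp_all
    | a :: t =>
      rw [runB]
      have haux : ∀ frames : List (List Char × List Char),
          (∀ p ∈ frames, p.1.length ≤ n) → ∀ rest acc,
          runB (frames ++ rest) acc = runB rest (acc ++ frames.flatMap (fun p => perms p.1 p.2)) := by
        intro frames
        induction frames with
        | nil => intro _ rest acc; simp
        | cons p fr ihf =>
          intro hlen rest acc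
          obtain ⟨ps, pc⟩ := p
          rw [List.cons_append, ih ps (hlen (ps, pc) (by simp)) pc,
              ihf (fun q hq => hlen q (by simp [hq])) rest]
          simp [List.append_assoc]
      rw [haux (childrenB (a :: t) cur)
            (fun p hp => by
              have h2 := childrenB_mem_len (a :: t) cur p hp
              simp only [List.length_cons] at h2 hs
              omega)
            rest acc]
      congr 1
      rw [perms_cons]
      unfold childrenB
      rw [List.flatMap_assoc]
      apply congrArg
      apply List.flatMap_congr
      intro i hi
      simp [body]

-- ===== VERDICT (by name: the statement is the Claim_ definition above) =====
theorem IncludeSubsets_spec : Claim_equal_IncludeSubsets := by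
  intro inputString inputList currentString _
  unfold Spec_IncludeSubsets IncludeSubsets IncludeSubsets_alt
  rw [goA_eq inputString.toList.length _ (le_refl _),
      runB_eq inputString.toList.length _ (le_refl _), runB]
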